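-- pv_equiv track=rewrite | github.com/Vortexx-hash/OMNIRRAG | scripts/debate_visualizer.py | _identify_isolated
-- ===== SOURCE A (Python) =====
-- def _identify_isolated(
--     support_map: dict[str, list[str]], agent_ids: list[str]
-- ) -> list[str]:
--     if len(agent_ids) <= 1:
--         return []
--     agents_with_crosssupport: set[str] = set()
--     for supporters in support_map.values():
--         if len(supporters) > 1:
--             for aid in supporters:
--                 agents_with_crosssupport.add(aid)
--     return [aid for aid in agent_ids if aid not in agents_with_crosssupport]
-- ===== SOURCE B (Python) =====
-- def _identify_isolated(
--     support_map: dict[str, list[str]], agent_ids: list[str]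
-- ) -> list[str]:
--     if len(agent_ids) <= 1:
--         return []
--     return [
--         aid
--         for aid in agent_ids
--         if not any(len(sup) > 1 and aid in sup for sup in support_map.values())
--     ]
-- ===== Notes on version B (the rewrite author's own statement) =====
-- stated objective: simpler
-- what changed: Drops the intermediate cross-support set: instead of an index-building pass over support_map followed by set membership, B filters agent_ids directly, deciding isolation per agent by rescanning the support groups with any().
import Mathlib
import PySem

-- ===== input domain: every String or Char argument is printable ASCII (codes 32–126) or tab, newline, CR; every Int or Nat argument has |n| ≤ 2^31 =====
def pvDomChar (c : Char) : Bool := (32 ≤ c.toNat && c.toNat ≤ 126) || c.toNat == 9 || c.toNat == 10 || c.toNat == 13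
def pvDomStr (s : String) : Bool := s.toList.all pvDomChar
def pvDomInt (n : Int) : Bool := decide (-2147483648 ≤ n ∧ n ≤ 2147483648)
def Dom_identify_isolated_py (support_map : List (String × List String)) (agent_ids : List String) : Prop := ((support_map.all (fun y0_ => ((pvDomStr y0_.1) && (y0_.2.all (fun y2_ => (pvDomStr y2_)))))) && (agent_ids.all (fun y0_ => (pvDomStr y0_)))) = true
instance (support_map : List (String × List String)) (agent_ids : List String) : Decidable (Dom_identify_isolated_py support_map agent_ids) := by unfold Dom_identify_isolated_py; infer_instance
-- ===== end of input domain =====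

-- B replaces A's pre-built cross-support set with a direct per-agent rescan of the support groups (objective: simpler).
-- ===== PORT A =====
def identify_isolated_py (support_map : List (String × List String)) (agent_ids : List String) : List String :=
  if agent_ids.length ≤ 1 then []
  else
    let agents_with_crosssupport : PySem.Set String :=
      support_map.foldl (fun acc kv =>
        if kv.2.length > 1 then kv.2.foldl PySem.Set.add acc else acc) PySem.Set.empty
    agent_ids.filter (fun aid => !(PySem.Set.contains agents_with_crosssupport aid))

-- ===== PORT B =====
def identify_isolated_py_alt (support_map : List (String × List String)) (agent_ids : List String) : List String :=
  if agent_ids.length ≤ 1 then []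
  else
    agent_ids.filter (fun aid =>
      !(support_map.any (fun kv => decide (kv.2.length > 1) && kv.2.contains aid)))

-- ===== PRECONDITION & SPEC =====
def Spec_identify_isolated_py (support_map : List (String × List String)) (agent_ids : List String) (out : List String) : Prop := out = identify_isolated_py_alt support_map agent_ids
instance (support_map : List (String × List String)) (agent_ids : List String) (out : List String) : Decidable (Spec_identify_isolated_py support_map agent_ids out) := by unfold Spec_identify_isolated_py; infer_instance

-- ===== CLAIM (what is proved, stated in full; the proofs are below) =====
def Claim_equal_identify_isolated_py : Prop := ∀ (support_map : List (String × List String)) (agent_ids : List String), Dom_identify_isolated_py support_map agent_ids → Spec_identify_isolated_py support_map agent_ids (identify_isolated_py support_map agent_ids)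

-- ===== LEMMAS AND PROOFS =====

-- ===== VERDICT (by name: the statement is the Claim_ definition above) =====
-- membership in the incrementally built set = existence of a large group containing x
lemma mem_foldl_add (x : String) (xs : List String) (acc : PySem.Set String) :
    x ∈ xs.foldl PySem.Set.add acc ↔ x ∈ acc ∨ x ∈ xs := by
  induction xs generalizing acc with
  | nil => simp
  | cons y ys ih => simp [List.foldl, ih, PySem.Set.mem_add]; tauto

lemma mem_cross_set (x : String) (sm : List (String × List String)) (acc : PySem.Set String) :
    x ∈ sm.foldl (fun acc kv =>
        if kv.2.length > 1 then kv.2.foldl PySem.Set.add acc else acc) acc ↔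
      x ∈ acc ∨ ∃ kv ∈ sm, kv.2.length > 1 ∧ x ∈ kv.2 := by
  induction sm generalizing acc with
  | nil => simp
  | cons p ps ih =>
    simp only [List.foldl]
    by_cases h : p.2.length > 1
    · simp [h, ih, mem_foldl_add]; tauto
    · simp only [if_neg h, ih]
      constructor
      · rintro (ha | ⟨kv, hkv, hl, hx⟩)
        · exact Or.inl ha
        · exact Or.inr ⟨kv, List.mem_cons_of_mem _ hkv, hl, hx⟩
      · rintro (ha | ⟨kv, hkv, hl, hx⟩)
        · exact Or.inl ha
        · rcases List.mem_cons.mp hkv with rfl | hkv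
          · exact absurd hl h
          · exact Or.inr ⟨kv, hkv, hl, hx⟩

theorem identify_isolated_py_spec : Claim_equal_identify_isolated_py := by
  intro sm ids _
  unfold Spec_identify_isolated_py identify_isolated_py identify_isolated_py_alt
  by_cases hlen : ids.length ≤ 1
  · simp [hlen]
  · simp only [if_neg hlen, PySem.Set.empty, PySem.Set.contains_eq_listContains]
    apply List.filter_congr
    intro aid _
    have h := mem_cross_set aid sm PySem.Set.empty
    simp only [PySem.Set.empty] at h
    by_cases hmem : aid ∈ sm.foldl (fun acc kv =>
        if kv.2.length > 1 then kv.2.foldl PySem.Set.add acc else acc) []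
    · rcases (h.mp hmem) with h' | ⟨kv, hkv, hl, hx⟩
      · simp at h'
      · have hc : List.contains (sm.foldl (fun acc kv =>
            if kv.2.length > 1 then kv.2.foldl PySem.Set.add acc else acc) []) aid = true := by
          simpa [List.contains_iff_mem] using hmem
        rw [hc]
        have ha : sm.any (fun kv => decide (kv.2.length > 1) && kv.2.contains aid) = true := by
          simp only [List.any_eq_true]
          exact ⟨kv, hkv, by simp [hl, hx]⟩
        rw [ha]
    · have hc : List.contains (sm.foldl (fun acc kv =>
          if kv.2.length > 1 then kv.2.foldl PySem.Set.add acc else acc) []) aid = false := by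
        simpa [List.contains_iff_mem] using hmem
      rw [hc]
      have ha : sm.any (fun kv => decide (kv.2.length > 1) && kv.2.contains aid) = false := by
        rw [List.any_eq_false]
        intro kv hkv
        simp only [Bool.and_eq_true, decide_eq_true_eq, not_and, List.contains_iff_mem]
        intro hl hx
        exact hmem (h.mpr (Or.inr ⟨kv, hkv, hl, by simpa [List.contains_iff_mem] using hx⟩))
      rw [ha]
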